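-- pv_equiv track=rewrite | github.com/LambdaLabsML/torchtitan | healthcheck.py | _ranks_str
-- ===== SOURCE A (Python) =====
-- def _ranks_str(ranks):
--     ranks = sorted(ranks)
--     if len(ranks) > 2 and all(r + 1 == ranks[i + 1] for i, r in enumerate(ranks[:-1])):
--         start = ranks[0]
--         end = ranks[-1]
--         ranks_display = f"{start}-{end}"
--     else:
--         ranks_display = ",".join(map(str, ranks))
--     return ranks_display
-- ===== SOURCE B (Python) =====
-- def _ranks_str(ranks):
--     distinct = set(ranks)
--     if (len(ranks) > 2 and len(distinct) == len(ranks)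
--             and max(distinct) - min(distinct) == len(ranks) - 1):
--         return f"{min(distinct)}-{max(distinct)}"
--     return ",".join(map(str, sorted(ranks)))
-- ===== Notes on version B (the rewrite author's own statement) =====
-- stated objective: alternative
-- what changed: Decides the contiguous case without sorting and without any adjacent-pair scan: a set gives distinctness (len(set)==len) and min/max give the span, so 'distinct and max-min==len-1' characterises a consecutive run; sorting happens only for the comma-join branch.
import Mathlib
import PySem

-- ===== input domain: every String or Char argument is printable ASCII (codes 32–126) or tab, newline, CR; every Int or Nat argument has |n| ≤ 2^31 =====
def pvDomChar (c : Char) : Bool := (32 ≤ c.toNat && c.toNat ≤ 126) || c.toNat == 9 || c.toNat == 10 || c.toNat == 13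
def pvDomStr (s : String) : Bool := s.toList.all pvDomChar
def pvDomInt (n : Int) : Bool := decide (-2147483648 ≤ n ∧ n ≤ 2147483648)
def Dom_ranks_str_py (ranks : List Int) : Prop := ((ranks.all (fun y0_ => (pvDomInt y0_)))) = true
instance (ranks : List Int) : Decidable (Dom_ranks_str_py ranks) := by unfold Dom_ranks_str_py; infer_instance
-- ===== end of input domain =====

-- B decides the contiguous case with a set (distinctness via len(set)==len) plus the min/max span,
-- sorting only for the comma-join branch, instead of A's sort + adjacent-pair scan; alternative, same cost.

-- ===== PORT A =====
def ranks_str_py (ranks : List Int) : String :=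
  let s := PySem.List.sorted ranks (fun x => x) false
  if 2 < s.length ∧
      (PySem.List.enumerate (PySem.List.slice s none (some (-1))) 0).all
        (fun p => PySem.List.pyGet? s (p.1 + 1) == some (p.2 + 1)) then
    PySem.Int.toStr (PySem.List.pyGetD s 0 0) ++ "-" ++ PySem.Int.toStr (PySem.List.pyGetD s (-1) 0)
  else
    PySem.Str.join "," (s.map PySem.Int.toStr)

-- ===== PORT B =====
-- min/max on the set carry '.getD 0'; they are reached only under 'len(ranks) > 2', so the set is
-- nonempty there and the default is never the value used (Python's short-circuit 'and' likewise
-- protects min/max from the empty set).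
def ranks_str_py_alt (ranks : List Int) : String :=
  let distinct := PySem.Set.ofList ranks
  if 2 < ranks.length ∧ PySem.Set.len distinct = (ranks.length : Int) ∧
      (PySem.List.max? distinct (fun x => x)).getD 0
        - (PySem.List.min? distinct (fun x => x)).getD 0 = (ranks.length : Int) - 1 then
    PySem.Int.toStr ((PySem.List.min? distinct (fun x => x)).getD 0) ++ "-" ++
      PySem.Int.toStr ((PySem.List.max? distinct (fun x => x)).getD 0)
  else
    PySem.Str.join "," ((PySem.List.sorted ranks (fun x => x) false).map PySem.Int.toStr)

-- ===== PRECONDITION & SPEC =====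
def Spec_ranks_str_py (ranks : List Int) (out : String) : Prop := out = ranks_str_py_alt ranks
instance (ranks : List Int) (out : String) : Decidable (Spec_ranks_str_py ranks out) := by unfold Spec_ranks_str_py; infer_instance

-- ===== CLAIM (what is proved, stated in full; the proofs are below) =====
def Claim_equal_ranks_str_py : Prop := ∀ (ranks : List Int), Dom_ranks_str_py ranks → Spec_ranks_str_py ranks (ranks_str_py ranks)

-- ===== LEMMAS AND PROOFS =====

-- A's generator condition, unfolded to an index-wise statement.
theorem condA_iff (s : List Int) :
    ((PySem.List.enumerate (PySem.List.slice s none (some (-1))) 0).all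
        (fun p => PySem.List.pyGet? s (p.1 + 1) == some (p.2 + 1)) = true)
    ↔ (∀ (k : Nat) (h : k + 1 < s.length), s[k + 1] = s[k] + 1) := by
  rw [PySem.List.slice_to_neg_one, List.all_eq_true]
  constructor
  · intro H k h
    have hk : k < s.dropLast.length := by simp [List.length_dropLast]; omega
    have hmem : ((0 : Int) + k, s.dropLast[k]) ∈ PySem.List.enumerate s.dropLast 0 :=
      (PySem.List.mem_enumerate_iff _ _ _).mpr ⟨k, hk, rfl⟩
    have := H _ hmem
    simp only [beq_iff_eq] at this
    have hcast : (0 : Int) + (k : Int) + 1 = ((k + 1 : Nat) : Int) := by push_cast; ring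
    rw [hcast, PySem.List.pyGet?_natCast] at this
    have hd : s.dropLast[k] = s[k] := List.getElem_dropLast ..
    rw [List.getElem?_eq_getElem h] at this
    simp only [Option.some.injEq] at this
    rw [this, hd]
  · intro H p hp
    obtain ⟨k, hk, rfl⟩ := (PySem.List.mem_enumerate_iff _ _ _).mp hp
    have h : k + 1 < s.length := by
      have := hk; simp [List.length_dropLast] at this; omega
    simp only [beq_iff_eq]
    have hcast : (0 : Int) + (k : Int) + 1 = ((k + 1 : Nat) : Int) := by push_cast; ring
    rw [hcast, PySem.List.pyGet?_natCast, List.getElem?_eq_getElem h]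
    have hd : s.dropLast[k] = s[k] := List.getElem_dropLast ..
    rw [hd, H k h]

-- Consecutive steps give the closed form s[k] = s[0] + k.
theorem stepup (s : List Int) (H : ∀ (k : Nat) (h : k + 1 < s.length), s[k + 1] = s[k] + 1) :
    ∀ (k : Nat) (hk : k < s.length), s[k] = s[0]'(by omega) + k := by
  intro k
  induction k with
  | zero => intro _; simp
  | succ n ih =>
    intro hk
    rw [H n hk, ih (by omega)]
    push_cast; ring

-- If set(xs) has as many elements as xs, xs had no duplicates.
theorem nodup_of_ofList_length (xs : List Int)
    (h : (PySem.Set.ofList xs).length = xs.length) : xs.Nodup := by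
  induction xs with
  | nil => exact List.nodup_nil
  | cons x t ih =>
    rw [PySem.Set.ofList_cons, List.length_cons, List.length_cons] at h
    by_cases hx : x ∈ t
    · exfalso
      have hmem : x ∈ PySem.Set.ofList t := (PySem.Set.mem_ofList t x).mpr hx
      have hlt : (((PySem.Set.ofList t).discard x).length) < (PySem.Set.ofList t).length :=
        List.length_filter_lt_length_iff_exists.mpr ⟨x, hmem, by simp⟩
      have hle := PySem.Set.length_ofList_le t
      omega
    · have heq : (PySem.Set.ofList t).discard x = PySem.Set.ofList t := by
        apply List.filter_eq_self.mpr
        intro y hy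
        have hyt : y ∈ t := (PySem.Set.mem_ofList t y).mp hy
        have hne : (y == x) = false := beq_eq_false_iff_ne.mpr (fun h => hx (h ▸ hyt))
        simp [hne]
      rw [heq] at h
      exact List.nodup_cons.mpr ⟨hx, ih (by omega)⟩

-- min over set(ranks) is the head of the sorted list s, max its last element.
theorem min_ofList_eq_head (ranks s : List Int)
    (hs : s = PySem.List.sorted ranks (fun x => x) false)
    (hlen : s.length = ranks.length) (h0 : 0 < ranks.length) :
    (PySem.List.min? (PySem.Set.ofList ranks) (fun x => x)).getD 0 = s[0]'(by omega) := by
  subst hs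
  obtain ⟨m, hm⟩ : ∃ m, PySem.List.min? (PySem.Set.ofList ranks) (fun x => x) = some m := by
    cases hc : PySem.List.min? (PySem.Set.ofList ranks) (fun x => x) with
    | none =>
      exfalso
      have he := (PySem.List.min?_eq_none_iff _ _).mp hc
      have hmem : ranks[0]'h0 ∈ PySem.Set.ofList ranks :=
        (PySem.Set.mem_ofList ranks _).mpr (List.getElem_mem h0)
      rw [he] at hmem; exact List.not_mem_nil hmem
    | some m => exact ⟨m, rfl⟩
  rw [hm]; simp only [Option.getD_some]
  have hmmem : m ∈ ranks := (PySem.Set.mem_ofList ranks m).mp (PySem.List.min?_mem hm)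
  have hmin : ∀ y ∈ PySem.Set.ofList ranks, m ≤ y := PySem.List.min?_isMin hm
  apply le_antisymm
  · refine hmin _ ((PySem.Set.mem_ofList ranks _).mpr ?_)
    rw [← PySem.List.mem_sorted ranks (fun x => x) false]
    exact List.getElem_mem _
  · have hm_s : m ∈ PySem.List.sorted ranks (fun x => x) false := by
      rw [PySem.List.mem_sorted]; exact hmmem
    obtain ⟨j, hj, hje⟩ := List.getElem_of_mem hm_s
    rw [← hje]
    exact PySem.List.sorted_id_getElem_mono ranks (Nat.zero_le j) hj

theorem max_ofList_eq_last (ranks s : List Int)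
    (hs : s = PySem.List.sorted ranks (fun x => x) false)
    (hlen : s.length = ranks.length) (h0 : 0 < ranks.length) :
    (PySem.List.max? (PySem.Set.ofList ranks) (fun x => x)).getD 0
      = s[ranks.length - 1]'(by omega) := by
  subst hs
  obtain ⟨m, hm⟩ : ∃ m, PySem.List.max? (PySem.Set.ofList ranks) (fun x => x) = some m := by
    cases hc : PySem.List.max? (PySem.Set.ofList ranks) (fun x => x) with
    | none =>
      exfalso
      have he := (PySem.List.max?_eq_none_iff _ _).mp hc
      have hmem : ranks[0]'h0 ∈ PySem.Set.ofList ranks :=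
        (PySem.Set.mem_ofList ranks _).mpr (List.getElem_mem h0)
      rw [he] at hmem; exact List.not_mem_nil hmem
    | some m => exact ⟨m, rfl⟩
  rw [hm]; simp only [Option.getD_some]
  have hmmem : m ∈ ranks := (PySem.Set.mem_ofList ranks m).mp (PySem.List.max?_mem hm)
  have hmax : ∀ y ∈ PySem.Set.ofList ranks, y ≤ m := PySem.List.max?_isMax hm
  apply le_antisymm
  · have hm_s : m ∈ PySem.List.sorted ranks (fun x => x) false := by
      rw [PySem.List.mem_sorted]; exact hmmem
    obtain ⟨j, hj, hje⟩ := List.getElem_of_mem hm_s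
    rw [← hje]
    exact PySem.List.sorted_id_getElem_mono ranks (by omega) (by omega)
  · refine hmax _ ((PySem.Set.mem_ofList ranks _).mpr ?_)
    rw [← PySem.List.mem_sorted ranks (fun x => x) false]
    exact List.getElem_mem _

-- In a nodup monotone integer list, indices j ≥ k are at least j - k apart in value.
theorem gaps (s : List Int) (hnd : s.Nodup)
    (hsort : ∀ (p q : Nat) (hpq : p ≤ q) (hq : q < s.length), s[p]'(by omega) ≤ s[q]) :
    ∀ (k j : Nat) (hkj : k ≤ j) (hj : j < s.length), (j : Int) - k ≤ s[j] - s[k]'(by omega) := by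
  intro k j
  induction j with
  | zero => intro hkj hj; interval_cases k; simp
  | succ n ih =>
    intro hkj hj
    by_cases hkn : k = n + 1
    · subst hkn; simp
    · have hkn' : k ≤ n := by omega
      have h1 := ih hkn' (by omega)
      have hle : s[n]'(by omega) ≤ s[n + 1] := hsort n (n + 1) (by omega) hj
      have hne : s[n]'(by omega) ≠ s[n + 1] := by
        intro he
        exact absurd ((hnd.getElem_inj_iff).mp he) (by omega)
      push_cast
      omega

-- The two contiguity tests agree on the sorted list s of ranks (any nonempty length).
theorem cond_iff (ranks s : List Int)
    (hs : s = PySem.List.sorted ranks (fun x => x) false)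
    (hlen : s.length = ranks.length) (h0 : 0 < ranks.length) :
    (∀ (k : Nat) (h : k + 1 < s.length), s[k + 1] = s[k] + 1)
    ↔ (PySem.Set.ofList ranks).length = ranks.length
      ∧ (PySem.List.max? (PySem.Set.ofList ranks) (fun x => x)).getD 0
          - (PySem.List.min? (PySem.Set.ofList ranks) (fun x => x)).getD 0
          = (ranks.length : Int) - 1 := by
  have hperm : s.Perm ranks := hs ▸ PySem.List.sorted_perm ..
  have hsort : ∀ (p q : Nat) (hpq : p ≤ q) (hq : q < s.length), s[p]'(by omega) ≤ s[q] := by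
    subst hs
    intro p q hpq hq
    exact PySem.List.sorted_id_getElem_mono ranks hpq hq
  have hmin := min_ofList_eq_head ranks s hs hlen h0
  have hmax := max_ofList_eq_last ranks s hs hlen h0
  have hcast : ((ranks.length - 1 : Nat) : Int) = (ranks.length : Int) - 1 := by
    push_cast [Nat.cast_sub (by omega : 1 ≤ ranks.length)]; ring
  constructor
  · intro H
    constructor
    · have hnd : s.Nodup := by
        rw [List.nodup_iff_injective_get]
        intro i j hij
        simp only [List.get_eq_getElem] at hij
        rw [stepup s H i.1 i.2, stepup s H j.1 j.2] at hij
        exact Fin.ext (by omega)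
      have : ranks.Nodup := hperm.nodup_iff.mp hnd
      rw [PySem.Set.ofList_eq_self_of_nodup ranks this]
    · rw [hmin, hmax, stepup s H (ranks.length - 1) (by omega), hcast]
      ring
  · rintro ⟨hl, hspan⟩
    have hndr : ranks.Nodup := nodup_of_ofList_length ranks hl
    have hnd : s.Nodup := hperm.nodup_iff.mpr hndr
    rw [hmin, hmax] at hspan
    intro k hk
    have g1 : ((k : Int)) - 0 ≤ s[k]'(by omega) - s[0]'(by omega) :=
      gaps s hnd hsort 0 k (by omega) (by omega)
    have g2 : (((ranks.length - 1 : Nat)) : Int) - (k + 1) ≤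
        s[ranks.length - 1]'(by omega) - s[k + 1]'(by omega) :=
      gaps s hnd hsort (k + 1) (ranks.length - 1) (by omega) (by omega)
    have g3 : ((k + 1 : Nat) : Int) - k ≤ s[k + 1]'(by omega) - s[k]'(by omega) :=
      gaps s hnd hsort k (k + 1) (by omega) (by omega)
    rw [hcast] at g2
    push_cast at g1 g2 g3
    omega

-- ===== VERDICT (by name: the statement is the Claim_ definition above) =====
theorem ranks_str_py_spec : Claim_equal_ranks_str_py := by
  intro ranks _
  unfold Spec_ranks_str_py ranks_str_py ranks_str_py_alt
  obtain ⟨s, hs⟩ : ∃ s, s = PySem.List.sorted ranks (fun x => x) false := ⟨_, rfl⟩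
  rw [← hs]
  have hlen : s.length = ranks.length := hs ▸ PySem.List.length_sorted ..
  by_cases h2 : 2 < ranks.length
  · have h0 : 0 < ranks.length := by omega
    have ha : PySem.List.pyGetD s 0 0 = s[0]'(by omega) := by
      unfold PySem.List.pyGetD
      rw [show (0 : Int) = ((0 : Nat) : Int) by norm_num, PySem.List.pyGet?_natCast,
        List.getElem?_eq_getElem (by omega : 0 < s.length)]
      rfl
    have hb : PySem.List.pyGetD s (-1) 0 = s[ranks.length - 1]'(by omega) := by
      unfold PySem.List.pyGetD
      rw [PySem.List.pyGet?_neg_one, List.getLast?_eq_getElem?,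
        List.getElem?_eq_getElem (by omega : s.length - 1 < s.length)]
      simp only [Option.getD_some]
      congr 1; omega
    have hiff := cond_iff ranks s hs hlen h0
    have hmin := min_ofList_eq_head ranks s hs hlen h0
    have hmax := max_ofList_eq_last ranks s hs hlen h0
    have hcA : (2 < s.length ∧
        (PySem.List.enumerate (PySem.List.slice s none (some (-1))) 0).all
          (fun p => PySem.List.pyGet? s (p.1 + 1) == some (p.2 + 1)) = true)
        ↔ (2 < ranks.length ∧ PySem.Set.len (PySem.Set.ofList ranks) = (ranks.length : Int) ∧
            (PySem.List.max? (PySem.Set.ofList ranks) (fun x => x)).getD 0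
              - (PySem.List.min? (PySem.Set.ofList ranks) (fun x => x)).getD 0
              = (ranks.length : Int) - 1) := by
      constructor
      · rintro ⟨hl, hall⟩
        have hc := hiff.mp ((condA_iff s).mp hall)
        refine ⟨h2, ?_, hc.2⟩
        unfold PySem.Set.len
        exact_mod_cast hc.1
      · rintro ⟨hl, hle, hsp⟩
        have hle' : (PySem.Set.ofList ranks).length = ranks.length := by
          unfold PySem.Set.len at hle
          exact_mod_cast hle
        exact ⟨by omega, (condA_iff s).mpr (hiff.mpr ⟨hle', hsp⟩)⟩
    rw [if_congr hcA rfl rfl]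
    by_cases hcond : (2 < ranks.length ∧ PySem.Set.len (PySem.Set.ofList ranks) = (ranks.length : Int) ∧
            (PySem.List.max? (PySem.Set.ofList ranks) (fun x => x)).getD 0
              - (PySem.List.min? (PySem.Set.ofList ranks) (fun x => x)).getD 0
              = (ranks.length : Int) - 1)
    · rw [if_pos hcond, if_pos hcond, ha, hb, hmin, hmax]
    · rw [if_neg hcond, if_neg hcond]
  · have hA : ¬ (2 < s.length ∧
        (PySem.List.enumerate (PySem.List.slice s none (some (-1))) 0).all
          (fun p => PySem.List.pyGet? s (p.1 + 1) == some (p.2 + 1)) = true) := by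
      rintro ⟨hl, -⟩; omega
    have hB : ¬ (2 < ranks.length ∧ PySem.Set.len (PySem.Set.ofList ranks) = (ranks.length : Int) ∧
            (PySem.List.max? (PySem.Set.ofList ranks) (fun x => x)).getD 0
              - (PySem.List.min? (PySem.Set.ofList ranks) (fun x => x)).getD 0
              = (ranks.length : Int) - 1) := by
      rintro ⟨hl, -⟩; omega
    rw [if_neg hA, if_neg hB]
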